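-- pv_equiv track=rewrite | github.com/peytontolbert/agent_kernel | agent_kernel/learning_compiler.py | _strip_task_lineage_suffix
-- ===== SOURCE A (Python) =====
-- def _strip_task_lineage_suffix(task_id: str) -> str:
--     normalized = str(task_id).strip()
--     for suffix in (
--         "_verifier_replay",
--         "_tool_replay",
--         "_episode_replay",
--         "_transition_pressure",
--         "_discovered",
--         "_skill_replay",
--         "_skill_transfer",
--         "_operator_replay",
--     ):
--         if normalized.endswith(suffix) and len(normalized) > len(suffix):
--             return normalized[: -len(suffix)]
--     return normalized
-- ===== SOURCE B (Python) =====
-- _LINEAGE_SUFFIXES = (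
--     "_verifier_replay",
--     "_tool_replay",
--     "_episode_replay",
--     "_transition_pressure",
--     "_discovered",
--     "_skill_replay",
--     "_skill_transfer",
--     "_operator_replay",
-- )
--
-- _MAX_SUFFIX_LEN = max(len(s) for s in _LINEAGE_SUFFIXES)
--
--
-- def _strip_task_lineage_suffix(task_id: str) -> str:
--     # Scan cut positions left to right: at the first position k >= 1 whose tail
--     # is a known lineage suffix, cut there.  Only the last _MAX_SUFFIX_LEN
--     # positions can match, so the scan starts there.
--     normalized = str(task_id).strip()
--     for k in range(max(1, len(normalized) - _MAX_SUFFIX_LEN), len(normalized)):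
--         if normalized[k:] in _LINEAGE_SUFFIXES:
--             return normalized[:k]
--     return normalized
-- ===== Notes on version B (the rewrite author's own statement) =====
-- stated objective: alternative
-- what changed: Replaces the per-suffix endswith loop by a left-to-right scan over candidate cut positions in the last max-suffix-length window, cutting at the first position whose tail is a known suffix; correctness relies on no lineage suffix being a suffix of another.
import Mathlib
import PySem

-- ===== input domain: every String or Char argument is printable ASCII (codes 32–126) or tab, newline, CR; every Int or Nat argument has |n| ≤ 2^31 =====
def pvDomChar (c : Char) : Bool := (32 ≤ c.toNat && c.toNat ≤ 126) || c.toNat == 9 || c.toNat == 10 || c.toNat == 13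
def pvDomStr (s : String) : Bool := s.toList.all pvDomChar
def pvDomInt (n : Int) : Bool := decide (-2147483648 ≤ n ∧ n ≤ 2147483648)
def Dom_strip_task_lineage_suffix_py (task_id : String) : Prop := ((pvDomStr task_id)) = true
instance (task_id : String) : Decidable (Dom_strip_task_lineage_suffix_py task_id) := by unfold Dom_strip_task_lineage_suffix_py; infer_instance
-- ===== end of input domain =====

-- B replaces A's per-suffix endswith loop by a left-to-right scan over candidate cut
-- positions (the last max-suffix-length window), cutting at the first position whose
-- tail is a known lineage suffix (objective: alternative algorithm, same cost).

-- ===== PORT A =====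
def pvSuffixesA : List (List Char) :=
  ["_verifier_replay".toList, "_tool_replay".toList, "_episode_replay".toList,
   "_transition_pressure".toList, "_discovered".toList, "_skill_replay".toList,
   "_skill_transfer".toList, "_operator_replay".toList]

-- A's for-loop over the suffix tuple, branch for branch.
def pvAGo (n : List Char) : List (List Char) → List Char
  | [] => n
  | s :: ss =>
      if PySem.Chars.endswith n s ∧ s.length < n.length then
        PySem.List.slice n none (some (-(s.length : Int)))
      else pvAGo n ss

def strip_task_lineage_suffix_py (task_id : String) : String :=
  let normalized := PySem.Str.strip task_id
  String.ofList (pvAGo normalized.toList pvSuffixesA)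

-- ===== PORT B =====
def pvSuffixesB : List (List Char) :=
  ["_verifier_replay".toList, "_tool_replay".toList, "_episode_replay".toList,
   "_transition_pressure".toList, "_discovered".toList, "_skill_replay".toList,
   "_skill_transfer".toList, "_operator_replay".toList]

def pvMaxSuffixLen : Nat := (pvSuffixesB.map List.length).foldl max 0

-- B's for-loop over cut positions k: tail = normalized[k:], cut = normalized[:k].
def pvBGo (n : List Char) (k : Nat) : List Char :=
  if h : k < n.length then
    if List.drop k n ∈ pvSuffixesB then List.take k n
    else pvBGo n (k + 1)
  else n
termination_by n.length - k

def strip_task_lineage_suffix_py_alt (task_id : String) : String :=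
  let normalized := PySem.Str.strip task_id
  String.ofList (pvBGo normalized.toList (max 1 (normalized.toList.length - pvMaxSuffixLen)))

-- ===== PRECONDITION & SPEC =====
def Spec_strip_task_lineage_suffix_py (task_id : String) (out : String) : Prop := out = strip_task_lineage_suffix_py_alt task_id
instance (task_id : String) (out : String) : Decidable (Spec_strip_task_lineage_suffix_py task_id out) := by unfold Spec_strip_task_lineage_suffix_py; infer_instance

-- ===== CLAIM (what is proved, stated in full; the proofs are below) =====
def Claim_equal_strip_task_lineage_suffix_py : Prop := ∀ (task_id : String), Dom_strip_task_lineage_suffix_py task_id → Spec_strip_task_lineage_suffix_py task_id (strip_task_lineage_suffix_py task_id)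

-- ===== LEMMAS AND PROOFS =====

-- no lineage suffix is a suffix of another (distinct ones), and none is empty
lemma pv_uniq : ∀ s ∈ pvSuffixesA, ∀ t ∈ pvSuffixesA, s <:+ t → s = t := by decide

lemma pv_ne_nil : ∀ s ∈ pvSuffixesA, s ≠ [] := by decide

lemma pv_len_le : ∀ s ∈ pvSuffixesA, s.length ≤ pvMaxSuffixLen := by decide

lemma pvB_eq_A : pvSuffixesB = pvSuffixesA := rfl

-- A-side: some suffix matches
lemma pvAGo_match (p s : List Char) (hs : s ∈ pvSuffixesA) (hp : p ≠ []) :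
    ∀ L : List (List Char), (∀ t ∈ L, t ∈ pvSuffixesA) → s ∈ L →
      pvAGo (p ++ s) L = p := by
  intro L
  induction L with
  | nil => intro _ h; cases h
  | cons t ss ih =>
      intro hsub hmem
      have ht : t ∈ pvSuffixesA := hsub t (List.mem_cons_self ..)
      by_cases hg : PySem.Chars.endswith (p ++ s) t ∧ t.length < (p ++ s).length
      · have hsuf : t <:+ p ++ s := (PySem.Chars.endswith_iff _ _).mp hg.1
        have hssuf : s <:+ p ++ s := ⟨p, rfl⟩
        have hts : t = s := by
          rcases List.suffix_or_suffix_of_suffix hsuf hssuf with h | h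
          · exact pv_uniq t ht s hs h
          · exact (pv_uniq s hs t ht h).symm
        subst hts
        simp only [pvAGo, if_pos hg]
        rw [PySem.List.slice_to_neg_natCast _ _ (by
          have := pv_ne_nil t ht
          exact List.length_pos_iff.mpr this)]
        simp
      · simp only [pvAGo, if_neg hg]
        have hts : t ≠ s := by
          intro h; subst h
          exact hg ⟨(PySem.Chars.endswith_iff _ _).mpr ⟨p, rfl⟩, by
            simp [List.length_append]
            exact List.length_pos_iff.mpr hp⟩
        have : s ∈ ss := by
          rcases List.mem_cons.mp hmem with h | h
          · exact absurd h.symm hts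
          · exact h
        exact ih (fun u hu => hsub u (List.mem_cons_of_mem _ hu)) this

-- A-side: no suffix matches
lemma pvAGo_nomatch (n : List Char)
    (h : ∀ t ∈ pvSuffixesA, ¬(t <:+ n ∧ t.length < n.length)) :
    ∀ L : List (List Char), (∀ t ∈ L, t ∈ pvSuffixesA) → pvAGo n L = n := by
  intro L
  induction L with
  | nil => intro _; rfl
  | cons t ss ih =>
      intro hsub
      have ht : t ∈ pvSuffixesA := hsub t (List.mem_cons_self ..)
      have hg : ¬(PySem.Chars.endswith n t ∧ t.length < n.length) := by
        intro ⟨h1, h2⟩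
        exact h t ht ⟨(PySem.Chars.endswith_iff _ _).mp h1, h2⟩
      simp only [pvAGo, if_neg hg]
      exact ih (fun u hu => hsub u (List.mem_cons_of_mem _ hu))

-- B-side: some suffix matches
lemma pvBGo_match (p s : List Char) (hs : s ∈ pvSuffixesA) :
    ∀ k : Nat, 1 ≤ k → k ≤ p.length → pvBGo (p ++ s) k = p := by
  intro k
  induction hn : p.length - k using Nat.strong_induction_on generalizing k with
  | _ m ih =>
      intro hk1 hkp
      have hslen : 0 < s.length := List.length_pos_iff.mpr (pv_ne_nil s hs)
      have hlt : k < (p ++ s).length := by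
        simp [List.length_append]; omega
      rw [pvBGo, dif_pos hlt]
      by_cases hmem : List.drop k (p ++ s) ∈ pvSuffixesB
      · rw [if_pos hmem]
        rw [pvB_eq_A] at hmem
        have hdk : List.drop k (p ++ s) = List.drop k p ++ s :=
          List.drop_append_of_le_length hkp
        have hsub : s <:+ List.drop k (p ++ s) := by
          rw [hdk]; exact ⟨List.drop k p, rfl⟩
        have heq : s = List.drop k (p ++ s) := pv_uniq s hs _ hmem hsub
        have hk : k = p.length := by
          have := congrArg List.length heq
          rw [hdk] at this
          simp at this
          omega
        subst hk
        simp
      · rw [if_neg hmem]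
        have hkne : k ≠ p.length := by
          intro h; subst h
          apply hmem
          rw [pvB_eq_A]
          simpa using hs
        exact ih (p.length - (k + 1)) (by omega) (k + 1) rfl (by omega) (by omega)

-- B-side: no suffix matches
lemma pvBGo_nomatch (n : List Char)
    (h : ∀ t ∈ pvSuffixesA, ¬(t <:+ n ∧ t.length < n.length)) :
    ∀ k : Nat, 1 ≤ k → pvBGo n k = n := by
  intro k
  induction hn : n.length - k using Nat.strong_induction_on generalizing k with
  | _ m ih =>
      intro hk1
      rw [pvBGo]
      by_cases hlt : k < n.length
      · rw [dif_pos hlt]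
        have hmem : List.drop k n ∉ pvSuffixesB := by
          intro hmem
          rw [pvB_eq_A] at hmem
          exact h _ hmem ⟨List.drop_suffix _ _, by simp; omega⟩
        rw [if_neg hmem]
        exact ih (n.length - (k + 1)) (by omega) (k + 1) rfl (by omega)
      · rw [dif_neg hlt]

lemma pv_main (n : List Char) :
    pvAGo n pvSuffixesA = pvBGo n (max 1 (n.length - pvMaxSuffixLen)) := by
  by_cases h : ∃ s ∈ pvSuffixesA, s <:+ n ∧ s.length < n.length
  · obtain ⟨s, hs, ⟨p, hpn⟩, hlen⟩ := h
    subst hpn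
    have hp : p ≠ [] := by
      intro h; subst h; simp at hlen
    rw [pvAGo_match p s hs hp pvSuffixesA (fun _ h => h) hs,
        pvBGo_match p s hs _ (le_max_left _ _) (by
          have h1 := List.length_pos_iff.mpr hp
          have h2 := pv_len_le s hs
          simp only [List.length_append]
          omega)]
  · have h' : ∀ t ∈ pvSuffixesA, ¬(t <:+ n ∧ t.length < n.length) := by
      intro t ht hc; exact h ⟨t, ht, hc⟩
    rw [pvAGo_nomatch n h' pvSuffixesA (fun _ h => h),
        pvBGo_nomatch n h' _ (le_max_left _ _)]

-- ===== VERDICT (by name: the statement is the Claim_ definition above) =====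
theorem strip_task_lineage_suffix_py_spec : Claim_equal_strip_task_lineage_suffix_py := by
  intro task_id _
  unfold Spec_strip_task_lineage_suffix_py strip_task_lineage_suffix_py strip_task_lineage_suffix_py_alt
  simp only [pv_main]
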